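-- pv_equiv track=rewrite | github.com/NairSiddharth/GridironMetrics | modules/constants.py | get_all_team_codes_for_year
-- ===== SOURCE A (Python) =====
-- NFLVERSE_TEAM_CODES = {
--     # Current teams (as of 2025)
--     "ari": "Arizona Cardinals",
--     "atl": "Atlanta Falcons",
--     "bal": "Baltimore Ravens",
--     "buf": "Buffalo Bills",
--     "car": "Carolina Panthers",
--     "chi": "Chicago Bears",
--     "cin": "Cincinnati Bengals",
--     "cle": "Cleveland Browns",
--     "dal": "Dallas Cowboys",
--     "den": "Denver Broncos",
--     "det": "Detroit Lions",
--     "gb": "Green Bay Packers",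
--     "hou": "Houston Texans",
--     "ind": "Indianapolis Colts",
--     "jax": "Jacksonville Jaguars",
--     "kc": "Kansas City Chiefs",
--     "lv": "Las Vegas Raiders",          # Current (2020+)
--     "lac": "Los Angeles Chargers",      # Current (2017+)
--     "la": "Los Angeles Rams",           # Current (2016+)
--     "mia": "Miami Dolphins",
--     "min": "Minnesota Vikings",
--     "ne": "New England Patriots",
--     "no": "New Orleans Saints",
--     "nyg": "New York Giants",
--     "nyj": "New York Jets",
--     "phi": "Philadelphia Eagles",
--     "pit": "Pittsburgh Steelers",
--     "sf": "San Francisco 49ers",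
--     "sea": "Seattle Seahawks",
--     "tb": "Tampa Bay Buccaneers",
--     "ten": "Tennessee Titans",
--     "was": "Washington Commanders",
--
--     # Historical codes (for relocated teams, used in early cache data 2000-2002)
--     "oak": "Oakland Raiders",           # Historical (used 2000-2002 in cache)
--     "sd": "San Diego Chargers",         # Historical (used 2000-2002 in cache)
--     "stl": "St. Louis Rams",            # Historical (used 2000-2002 in cache)
--     "jac": "Jacksonville Jaguars",      # Historical alternate code
-- }
--
-- def get_all_team_codes_for_year(year: int) -> list:
--     """
--     Get all valid team codes for a specific year.
--
--     This accounts for: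
--     - Teams that didn't exist yet (e.g., Houston Texans before 2002)
--     - Team relocations and which codes to use
--
--     Args:
--         year: Season year
--
--     Returns:
--         List of team codes that should have data for that year
--     """
--     all_codes = []
--
--     # Get all nflverse codes
--     for code in NFLVERSE_TEAM_CODES.keys():
--         # Skip historical codes if we're past the relocation
--         if code in ["oak", "sd", "stl"] and year > 2002:
--             continue
--
--         # Skip current relocated team codes for early years
--         if year <= 2002:
--             if code in ["lv", "lac", "la"]:
--                 continue
--
--         # Skip Houston Texans before 2002
--         if code == "hou" and year < 2002:
--             continue
--
--         # Skip jac (use jax instead)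
--         if code == "jac":
--             continue
--
--         all_codes.append(code)
--
--     return sorted(all_codes)
-- ===== SOURCE B (Python) =====
-- # Only three distinct eras exist, so the answer is precomputed once per era:
-- # a lookup among three fixed sorted rosters, no per-code filtering at call time.
--
-- _EARLY_ROSTER = ['ari', 'atl', 'bal', 'buf', 'car', 'chi', 'cin', 'cle', 'dal',
--                  'den', 'det', 'gb', 'ind', 'jax', 'kc', 'mia', 'min', 'ne', 'no',
--                  'nyg', 'nyj', 'oak', 'phi', 'pit', 'sd', 'sea', 'sf', 'stl', 'tb',
--                  'ten', 'was']                      # year < 2002 (no Texans yet)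
-- _ROSTER_2002 = ['ari', 'atl', 'bal', 'buf', 'car', 'chi', 'cin', 'cle', 'dal',
--                 'den', 'det', 'gb', 'hou', 'ind', 'jax', 'kc', 'mia', 'min', 'ne',
--                 'no', 'nyg', 'nyj', 'oak', 'phi', 'pit', 'sd', 'sea', 'sf', 'stl',
--                 'tb', 'ten', 'was']                 # year == 2002
-- _MODERN_ROSTER = ['ari', 'atl', 'bal', 'buf', 'car', 'chi', 'cin', 'cle', 'dal',
--                   'den', 'det', 'gb', 'hou', 'ind', 'jax', 'kc', 'la', 'lac', 'lv',
--                   'mia', 'min', 'ne', 'no', 'nyg', 'nyj', 'phi', 'pit', 'sea',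
--                   'sf', 'tb', 'ten', 'was']         # year > 2002
--
-- def get_all_team_codes_for_year(year: int) -> list:
--     if year > 2002:
--         return list(_MODERN_ROSTER)
--     if year == 2002:
--         return list(_ROSTER_2002)
--     return list(_EARLY_ROSTER)
-- ===== Notes on version B (the rewrite author's own statement) =====
-- stated objective: faster
-- what changed: Replaces the per-code filter loop plus sort with a constant-time selection among three precomputed sorted era rosters (the function has only three distinct outputs).
import Mathlib
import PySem

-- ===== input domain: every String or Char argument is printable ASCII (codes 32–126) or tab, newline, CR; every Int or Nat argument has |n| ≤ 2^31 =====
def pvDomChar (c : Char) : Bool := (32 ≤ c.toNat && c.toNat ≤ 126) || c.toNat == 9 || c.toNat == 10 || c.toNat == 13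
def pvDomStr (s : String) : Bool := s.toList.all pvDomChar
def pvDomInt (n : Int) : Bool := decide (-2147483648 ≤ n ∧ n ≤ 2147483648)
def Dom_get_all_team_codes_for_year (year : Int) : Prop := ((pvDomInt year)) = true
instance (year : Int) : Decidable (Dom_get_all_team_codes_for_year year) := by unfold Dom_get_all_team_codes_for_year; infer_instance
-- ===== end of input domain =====

-- B replaces the filter-then-sort loop by a constant-time selection among three
-- precomputed sorted era rosters (the function has only three distinct outputs).

-- ===== PORT A =====
-- keys of NFLVERSE_TEAM_CODES, in insertion order
def pvKeys : List String :=
  ["ari","atl","bal","buf","car","chi","cin","cle","dal","den","det","gb","hou",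
   "ind","jax","kc","lv","lac","la","mia","min","ne","no","nyg","nyj","phi","pit",
   "sf","sea","tb","ten","was","oak","sd","stl","jac"]

-- the loop body of A: the four 'continue' guards in order, else append
def pvLoopA (year : Int) (acc : List String) (code : String) : List String :=
  if code ∈ ["oak","sd","stl"] ∧ year > 2002 then acc
  else if year ≤ 2002 ∧ code ∈ ["lv","lac","la"] then acc
  else if code = "hou" ∧ year < 2002 then acc
  else if code = "jac" then acc
  else acc ++ [code]

def get_all_team_codes_for_year (year : Int) : List String :=
  PySem.List.sorted (pvKeys.foldl (pvLoopA year) []) (fun x => x) false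

-- ===== PORT B =====
def pvEarlyRoster : List String :=
  ["ari","atl","bal","buf","car","chi","cin","cle","dal","den","det","gb","ind",
   "jax","kc","mia","min","ne","no","nyg","nyj","oak","phi","pit","sd","sea","sf",
   "stl","tb","ten","was"]
def pvRoster2002 : List String :=
  ["ari","atl","bal","buf","car","chi","cin","cle","dal","den","det","gb","hou",
   "ind","jax","kc","mia","min","ne","no","nyg","nyj","oak","phi","pit","sd","sea",
   "sf","stl","tb","ten","was"]
def pvModernRoster : List String :=
  ["ari","atl","bal","buf","car","chi","cin","cle","dal","den","det","gb","hou",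
   "ind","jax","kc","la","lac","lv","mia","min","ne","no","nyg","nyj","phi","pit",
   "sea","sf","tb","ten","was"]

def get_all_team_codes_for_year_alt (year : Int) : List String :=
  if year > 2002 then pvModernRoster
  else if year = 2002 then pvRoster2002
  else pvEarlyRoster

-- ===== PRECONDITION & SPEC =====
def Spec_get_all_team_codes_for_year (year : Int) (out : List String) : Prop := out = get_all_team_codes_for_year_alt year
instance (year : Int) (out : List String) : Decidable (Spec_get_all_team_codes_for_year year out) := by unfold Spec_get_all_team_codes_for_year; infer_instance

-- ===== CLAIM (what is proved, stated in full; the proofs are below) =====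
def Claim_equal_get_all_team_codes_for_year : Prop := ∀ (year : Int), Dom_get_all_team_codes_for_year year → Spec_get_all_team_codes_for_year year (get_all_team_codes_for_year year)

-- ===== LEMMAS AND PROOFS =====
-- A's result depends on year only through the three comparisons with 2002
theorem pvA_congr (y z : Int) (h1 : (y > 2002) ↔ (z > 2002)) (h2 : (y ≤ 2002) ↔ (z ≤ 2002))
    (h3 : (y < 2002) ↔ (z < 2002)) :
    get_all_team_codes_for_year y = get_all_team_codes_for_year z := by
  unfold get_all_team_codes_for_year pvLoopA
  simp only [propext h1, propext h2, propext h3]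

-- at each representative year, A's filter-then-sort equals the precomputed roster
theorem pvEval2000 : get_all_team_codes_for_year 2000 = pvEarlyRoster := by
  unfold get_all_team_codes_for_year
  apply PySem.List.sorted_id_eq_of_perm_of_pairwise
  · decide
  · simp only [String.le_iff_toList_le]; decide

theorem pvEval2002 : get_all_team_codes_for_year 2002 = pvRoster2002 := by
  unfold get_all_team_codes_for_year
  apply PySem.List.sorted_id_eq_of_perm_of_pairwise
  · decide
  · simp only [String.le_iff_toList_le]; decide

theorem pvEval2003 : get_all_team_codes_for_year 2003 = pvModernRoster := by
  unfold get_all_team_codes_for_year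
  apply PySem.List.sorted_id_eq_of_perm_of_pairwise
  · decide
  · simp only [String.le_iff_toList_le]; decide

-- ===== VERDICT (by name: the statement is the Claim_ definition above) =====
theorem get_all_team_codes_for_year_spec : Claim_equal_get_all_team_codes_for_year := by
  intro year _
  unfold Spec_get_all_team_codes_for_year get_all_team_codes_for_year_alt
  rcases lt_trichotomy year 2002 with h | h | h
  · rw [if_neg (by omega), if_neg (by omega),
      pvA_congr year 2000 (by omega) (by omega) (by omega), pvEval2000]
  · subst h; rw [if_neg (by omega), if_pos rfl, pvEval2002]
  · rw [if_pos (by omega), pvA_congr year 2003 (by omega) (by omega) (by omega), pvEval2003]
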